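-- pv_equiv track=rewrite | github.com/MarkGasse/Huiswerk-TCTI-V2ALDS1-11_2018- | week2/week2_1.py | machtv3
-- ===== SOURCE A (Python) =====
-- def machtv3(getal,macht):
--     assert macht > 0
--
--     m = 1
--     teller = 0
--     while macht > 0:
--         teller += 1
--         if macht%2 == 0:
--             macht = macht // 2
--             getal = getal*getal
--
--         else:
--             macht -= 1
--             m = m *getal
--
--     return teller
-- ===== SOURCE B (Python) =====
-- def machtv3(getal, macht):
--     assert macht > 0
--     # closed form: the loop halves on even (bit_length()-1 times in total)
--     # and decrements on odd (once per set bit), so the count is their sum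
--     return (macht.bit_length() - 1) + macht.bit_count()
-- ===== Notes on version B (the rewrite author's own statement) =====
-- stated objective: faster
-- what changed: Replaces the O(log macht) exponentiation-by-squaring counting loop with the closed form (macht.bit_length()-1) + macht.bit_count().
import Mathlib
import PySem

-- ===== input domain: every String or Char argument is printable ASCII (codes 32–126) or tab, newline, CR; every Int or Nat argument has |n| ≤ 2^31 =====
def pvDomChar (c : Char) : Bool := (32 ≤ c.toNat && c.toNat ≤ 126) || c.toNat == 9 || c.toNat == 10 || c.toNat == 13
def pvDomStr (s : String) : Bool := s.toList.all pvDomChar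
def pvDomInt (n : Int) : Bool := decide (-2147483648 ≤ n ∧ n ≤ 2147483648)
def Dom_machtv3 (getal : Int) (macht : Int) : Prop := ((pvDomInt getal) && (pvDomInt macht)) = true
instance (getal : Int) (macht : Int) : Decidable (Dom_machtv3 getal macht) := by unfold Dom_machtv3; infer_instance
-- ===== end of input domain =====

-- B replaces A's squaring-loop iteration count by the closed form (bit_length - 1) + bit_count (faster).

-- ===== PORT A =====
-- while macht > 0: teller += 1; if even: macht //= 2, getal *= getal; else: macht -= 1, m *= getal
def machtv3Loop (getal macht m teller : Int) : Int :=
  if h : macht > 0 then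
    if PySem.Int.mod macht 2 = 0 then
      machtv3Loop (getal * getal) (PySem.Int.floordiv macht 2) m (teller + 1)
    else
      machtv3Loop getal (macht - 1) (m * getal) (teller + 1)
  else teller
termination_by macht.toNat
decreasing_by
  · have h2 : PySem.Int.floordiv macht 2 = macht / 2 :=
      PySem.Int.floordiv_eq_ediv_of_pos (by omega)
    rw [h2]; omega
  · omega

def machtv3 (getal : Int) (macht : Int) : Int :=
  machtv3Loop getal macht 1 0

-- ===== PORT B =====
def machtv3_alt (getal : Int) (macht : Int) : Int :=
  ((PySem.Int.bitLength macht : Int) - 1) + (PySem.Int.bitCount macht : Int)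

-- ===== PRECONDITION & SPEC =====
-- A asserts macht > 0 (AssertionError otherwise): exactly those inputs are excluded.
def Pre_machtv3 (getal : Int) (macht : Int) : Prop := macht > 0
instance (getal : Int) (macht : Int) : Decidable (Pre_machtv3 getal macht) := by
  unfold Pre_machtv3; infer_instance

def pvWitness_machtv3 : Int × Int := (3, 13)

def Spec_machtv3 (getal : Int) (macht : Int) (out : Int) : Prop := out = machtv3_alt getal macht
instance (getal : Int) (macht : Int) (out : Int) : Decidable (Spec_machtv3 getal macht out) := by
  unfold Spec_machtv3; infer_instance

-- ===== CLAIM (what is proved, stated in full; the proofs are below) =====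
def Claim_equal_machtv3 : Prop := ∀ (getal : Int) (macht : Int), Dom_machtv3 getal macht → Pre_machtv3 getal macht → Spec_machtv3 getal macht (machtv3 getal macht)

-- ===== LEMMAS AND PROOFS =====

-- Loop invariant: for macht > 0 the loop adds (bitLength macht - 1) + bitCount macht to teller.
theorem machtv3Loop_closed (n : Nat) : ∀ (getal m teller : Int), 0 < n →
    machtv3Loop getal (n : Int) m teller
      = teller + ((PySem.Int.bitLength (n : Int) : Int) - 1) + (PySem.Int.bitCount (n : Int) : Int) := by
  induction n using Nat.strong_induction_on with
  | _ n ih =>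
    intro getal m teller hn
    rw [machtv3Loop]
    have hpos : (0 : Int) < (n : Int) := by exact_mod_cast hn
    rw [dif_pos hpos]
    have hbl := PySem.Int.bitLength_natCast (m := n) hn
    have hbc := PySem.Int.bitCount_natCast (m := n) hn
    have hmod : PySem.Int.mod (n : Int) 2 = ((n % 2 : Nat) : Int) := by
      exact_mod_cast PySem.Int.mod_natCast n 2
    have hdiv : PySem.Int.floordiv (n : Int) 2 = ((n / 2 : Nat) : Int) := by
      exact_mod_cast PySem.Int.floordiv_natCast n 2
    by_cases he : n % 2 = 0
    · -- even branch
      rw [if_pos (by rw [hmod, he]; rfl), hdiv]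
      have hn2 : 0 < n / 2 := by omega
      rw [ih (n / 2) (by omega) _ _ _ hn2, hbl, hbc, he]
      push_cast
      ring
    · -- odd branch: n = 2*(n/2) + 1
      rw [if_neg (by rw [hmod]; omega)]
      have h1 : (n : Int) - 1 = ((n - 1 : Nat) : Int) := by omega
      rw [h1]
      by_cases h1n : n = 1
      · subst h1n
        simp only [Nat.sub_self, Nat.cast_zero]
        rw [machtv3Loop, dif_neg (by norm_num)]
        rw [hbl, hbc]
        norm_num
      · have hn1 : 0 < n - 1 := by omega
        rw [ih (n - 1) (by omega) _ _ _ hn1]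
        -- relate bitLength/bitCount of n and n-1 (n odd, n > 1) via halving at n and n-1
        have hbl' := PySem.Int.bitLength_natCast (m := n - 1) hn1
        have hbc' := PySem.Int.bitCount_natCast (m := n - 1) hn1
        have hhalf : (n - 1) / 2 = n / 2 := by omega
        have hm1 : (n - 1) % 2 = 0 := by omega
        rw [hbl, hbc, hbl', hbc', hhalf, hm1]
        have : n % 2 = 1 := by omega
        rw [this]
        push_cast
        ring

-- ===== VERDICT (by name: the statement is the Claim_ definition above) =====
theorem machtv3_spec : Claim_equal_machtv3 := by
  intro getal macht _ hpre
  unfold Spec_machtv3 machtv3 machtv3_alt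
  have hpos : (0 : Int) < macht := hpre
  have hn : macht = ((macht.toNat : Nat) : Int) := by omega
  rw [hn]
  exact (machtv3Loop_closed macht.toNat getal 1 0 (by omega)).trans (by ring)
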